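-- pv_equiv track=rewrite | github.com/napierson/AoC-2017 | Day 21/day21.py | join_square
-- ===== SOURCE A (Python) =====
-- def join_square(s):
-- 	n = len(s) * len(s[0][0])
-- 	rows = []
-- 	for i in range(0, n):
-- 		newrow = []
-- 		for j in range(0, len(s)):
-- 			newrow.append(s[i // len(s[0][0])][j][i % len(s[0][0])])
-- 		newrow = ''.join(newrow)
-- 		rows.append(newrow[:])
-- 	return rows
-- ===== SOURCE B (Python) =====
-- def join_square(s):
--     size = len(s[0][0])
--     rows = []
--     for block_row in s:
--         partial = [''] * size
--         for j in range(len(s)):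
--             partial = [partial[r] + block_row[j][r] for r in range(size)]
--         rows.extend(partial)
--     return rows
-- ===== Notes on version B (the rewrite author's own statement) =====
-- stated objective: alternative
-- what changed: Instead of A's single flat loop over all output rows that gathers each finished row across the blocks with i//size and i%size index arithmetic, B walks each block-row once, maintaining an accumulator of size partially built rows onto which each successive block's rows are concatenated, then extends the output with the finished chunk.
import Mathlib
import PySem

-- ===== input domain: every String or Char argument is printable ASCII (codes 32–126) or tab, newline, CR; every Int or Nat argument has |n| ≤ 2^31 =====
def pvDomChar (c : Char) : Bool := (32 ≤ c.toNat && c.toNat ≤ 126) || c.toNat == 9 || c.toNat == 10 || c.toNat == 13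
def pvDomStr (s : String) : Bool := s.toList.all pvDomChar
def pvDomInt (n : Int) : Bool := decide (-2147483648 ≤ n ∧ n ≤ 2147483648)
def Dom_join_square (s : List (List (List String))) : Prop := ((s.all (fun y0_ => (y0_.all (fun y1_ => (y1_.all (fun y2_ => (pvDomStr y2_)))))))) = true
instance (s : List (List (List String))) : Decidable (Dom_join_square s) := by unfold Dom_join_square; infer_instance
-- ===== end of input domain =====

-- B reassembles the grid block-row by block-row with an accumulator of partially built rows,
-- concatenating each block's rows onto the accumulator block by block, instead of A's flat
-- index loop with i//size and i%size that gathers each finished row across all blocks; same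
-- return values on Pre_, exactly the inputs where A returns (elsewhere both raise IndexError).

-- ===== PORT A =====
def join_square (s : List (List (List String))) : List String :=
  -- Python indexing s[...] is ported with pyGetD; Pre_ guarantees every index is in range
  let n : Int := PySem.List.len s * PySem.List.len (PySem.List.pyGetD (PySem.List.pyGetD s 0 []) 0 [])
  (PySem.List.pyRange 0 n 1).foldl (fun rows i =>
    let newrow :=
      (PySem.List.pyRange 0 (PySem.List.len s) 1).foldl (fun acc j =>
        acc ++ [PySem.List.pyGetD
                  (PySem.List.pyGetD
                    (PySem.List.pyGetD s
                      (PySem.Int.floordiv i (PySem.List.len (PySem.List.pyGetD (PySem.List.pyGetD s 0 []) 0 []))) [])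
                    j [])
                  (PySem.Int.mod i (PySem.List.len (PySem.List.pyGetD (PySem.List.pyGetD s 0 []) 0 []))) ""]) []
    rows ++ [PySem.Str.join "" newrow]) []

-- ===== PORT B =====
def join_square_alt (s : List (List (List String))) : List String :=
  -- [''] * size is pyRepeat [""] size; indexing partial[r], block_row[j][r] is pyGetD
  let size : Int := PySem.List.len (PySem.List.pyGetD (PySem.List.pyGetD s 0 []) 0 [])
  s.foldl (fun rows blockRow =>
    rows ++ ((PySem.List.pyRange 0 (PySem.List.len s) 1).foldl
      (fun acc j => (PySem.List.pyRange 0 size 1).map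
        (fun r => PySem.List.pyGetD acc r "" ++
          PySem.List.pyGetD (PySem.List.pyGetD blockRow j []) r ""))
      (PySem.List.pyRepeat [""] size))) []

-- ===== PRECONDITION & SPEC =====
-- Pre_ is exactly the set of inputs on which the Python A returns normally: the grid and its
-- first block-row are nonempty and (unless the first block is empty, which makes A's loop
-- bound n zero) every block-row has at least len(s) blocks, each of its first len(s) blocks
-- having at least len(s[0][0]) rows; everywhere else A (and B) raises IndexError.
def Pre_join_square (s : List (List (List String))) : Prop :=
  s ≠ [] ∧ s.getD 0 [] ≠ [] ∧
    (((s.getD 0 []).getD 0 []).length = 0 ∨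
      ∀ row ∈ s, s.length ≤ row.length ∧
        ∀ b ∈ row.take s.length, ((s.getD 0 []).getD 0 []).length ≤ b.length)
instance (s : List (List (List String))) : Decidable (Pre_join_square s) := by
  unfold Pre_join_square; infer_instance

def pvWitness_join_square : List (List (List String)) :=
  [[["ab","cd"],["ef","gh"]],[["ij","kl"],["mn","op"]]]

def Spec_join_square (s : List (List (List String))) (out : List String) : Prop :=
  out = join_square_alt s
instance (s : List (List (List String))) (out : List String) : Decidable (Spec_join_square s out) := by
  unfold Spec_join_square; infer_instance

-- ===== CLAIM (what is proved, stated in full; the proofs are below) =====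
def Claim_equal_join_square : Prop :=
  ∀ (s : List (List (List String))), Dom_join_square s → Pre_join_square s →
    Spec_join_square s (join_square s)

-- ===== LEMMAS AND PROOFS =====

-- range(m*sz) visited block by block: the flat index loop is a loop over q < m of a loop over r < sz
theorem range_mul_flatMap {α : Type} (G : Nat → α) (m sz : Nat) :
    (List.range (m*sz)).map G
      = (List.range m).flatMap (fun q => (List.range sz).map (fun r => G (q*sz+r))) := by
  induction m with
  | zero => simp
  | succ m ih =>
    have : (m+1)*sz = m*sz + sz := by ring
    rw [this, List.range_add, List.map_append, List.map_map, ih, List.range_succ,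
        List.flatMap_append]
    simp [Function.comp_def, Nat.add_comm]

theorem map_pyRange_mul {α : Type} (F : Int → α) (m sz : Nat) :
    (PySem.List.pyRange 0 ((m:Int)*(sz:Int)) 1).map F
      = (List.range m).flatMap (fun q => (List.range sz).map (fun r => F ((q*sz+r : Nat) : Int))) := by
  rw [PySem.List.pyRange_one]
  have h1 : (((m:Int)*(sz:Int) - 0)).toNat = m * sz := by omega
  rw [h1, List.map_map, Function.comp_def, range_mul_flatMap (fun k => F (0 + (k:Int))) m sz]
  simp

theorem map_pyRange_natCast {α : Type} (F : Int → α) (m : Nat) :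
    (PySem.List.pyRange 0 (m:Int) 1).map F = (List.range m).map (fun (k : Nat) => F ((k : Int))) := by
  rw [PySem.List.pyRange_one]
  have h1 : ((m:Int) - 0).toNat = m := by omega
  rw [h1, List.map_map]
  exact List.map_congr_left (fun k _ => by simp)

theorem map_range_getD_take {α : Type} (xs : List α) (d : α) (m : Nat) (h : m ≤ xs.length) :
    (List.range m).map (fun k => xs.getD k d) = xs.take m := by
  apply List.ext_getElem
  · simp [Nat.min_eq_left h]
  · intro i h1 h2
    simp only [List.getElem_map, List.getElem_range, List.getElem_take]
    rw [List.getD_eq_getElem xs d (by simp at h1; omega)]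

theorem range_flatMap_getD {α β : Type} (H : List α → List β) (d : List α) :
    ∀ (s : List (List α)), (List.range s.length).flatMap (fun q => H (s.getD q d)) = s.flatMap H := by
  intro s
  induction s with
  | nil => simp
  | cons x t ih =>
    rw [List.length_cons, List.range_succ_eq_map, List.flatMap_cons, List.flatMap_map]
    simp only [List.getD_cons_zero, List.getD_cons_succ]
    rw [ih, List.flatMap_cons]

theorem flatMap_congr_mem {α β : Type} {l : List α} {f g : α → List β}
    (h : ∀ x ∈ l, f x = g x) : l.flatMap f = l.flatMap g := by
  induction l with
  | nil => rfl
  | cons x t ih =>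
    rw [List.flatMap_cons, List.flatMap_cons, h x (by simp),
        ih (fun y hy => h y (by simp [hy]))]

-- ''.join on a cons: join "" (x :: l) = x ++ join "" l
theorem str_join_empty_cons (x : String) (l : List String) :
    PySem.Str.join "" (x :: l) = x ++ PySem.Str.join "" l := by
  apply String.toList_injective
  simp [PySem.Str.toList_join, PySem.Chars.join, List.intercalate]
  cases l <;> simp

-- reading position r of a map-over-range accumulator
theorem getD_range_map {α : Type} (f : Nat → α) (size r : Nat) (d : α) (h : r < size) :
    ((List.range size).map f).getD r d = f r := by
  rw [List.getD_eq_getElem _ d (by simp [h])]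
  simp

-- a loop 'for j in range(m): … xs[j] …' with m ≤ len(xs) is a fold over the first m elements
theorem foldl_pyRange_take {α β : Type} (g : β → α → β) (xs : List α) (d : α) (m : Nat)
    (h : m ≤ xs.length) (init : β) :
    (PySem.List.pyRange 0 (m:Int) 1).foldl (fun acc j => g acc (PySem.List.pyGetD xs j d)) init
      = (xs.take m).foldl g init := by
  rw [PySem.List.pyRange_one]
  have h1 : ((m:Int) - 0).toNat = m := by omega
  have h2 : (List.range m).map (fun k : Nat => (0:Int) + k)
      = (List.range m).map (fun k : Nat => (k:Int)) := by simp
  rw [h1, h2, List.foldl_map]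
  simp only [PySem.List.pyGetD_natCast]
  rw [← map_range_getD_take xs d m h, List.foldl_map]

-- the specialisation used for B's inner loop, in beta-reduced form
theorem foldl_pyRange_take_map (row : List (List String)) (m size : Nat)
    (h : m ≤ row.length) (init : List String) :
    (PySem.List.pyRange 0 (m:Int) 1).foldl
        (fun acc j => (PySem.List.pyRange 0 (size:Int) 1).map
          (fun r => PySem.List.pyGetD acc r "" ++
            PySem.List.pyGetD (PySem.List.pyGetD row j []) r "")) init
      = (row.take m).foldl
        (fun acc block => (PySem.List.pyRange 0 (size:Int) 1).map
          (fun r => PySem.List.pyGetD acc r "" ++ PySem.List.pyGetD block r "")) init :=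
  foldl_pyRange_take
    (fun acc block => (PySem.List.pyRange 0 (size:Int) 1).map
      (fun r => PySem.List.pyGetD acc r "" ++ PySem.List.pyGetD block r ""))
    row [] m h init

-- the accumulator fold: after folding all blocks, position r holds f r followed by the
-- concatenation of the r-th rows of the blocks
theorem fold_acc (size : Nat) :
    ∀ (blocks : List (List String)) (f : Nat → String),
      (∀ b ∈ blocks, size ≤ b.length) →
      blocks.foldl
          (fun acc block => (PySem.List.pyRange 0 (size:Int) 1).map
            (fun r => PySem.List.pyGetD acc r "" ++ PySem.List.pyGetD block r ""))
          ((List.range size).map f)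
        = (List.range size).map
            (fun r => f r ++ PySem.Str.join "" (blocks.map (fun b => b.getD r ""))) := by
  intro blocks
  induction blocks with
  | nil =>
    intro f _
    simp only [List.foldl_nil, List.map_nil]
    apply List.map_congr_left
    intro r _
    have : PySem.Str.join "" ([] : List String) = "" := rfl
    rw [this]
    exact String.append_empty.symm
  | cons b t ih =>
    intro f h
    rw [List.foldl_cons]
    have hstep : (PySem.List.pyRange 0 (size:Int) 1).map
        (fun r => PySem.List.pyGetD ((List.range size).map f) r "" ++ PySem.List.pyGetD b r "")
        = (List.range size).map (fun r => f r ++ b.getD r "") := by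
      rw [map_pyRange_natCast]
      apply List.map_congr_left
      intro r hr
      simp only [PySem.List.pyGetD_natCast]
      rw [getD_range_map f size r "" (List.mem_range.mp hr)]
    rw [hstep, ih (fun r => f r ++ b.getD r "") (fun x hx => h x (by simp [hx]))]
    apply List.map_congr_left
    intro r _
    rw [List.map_cons, str_join_empty_cons, String.append_assoc]

-- folding the constantly-empty step from the empty accumulator stays empty
theorem fold_const_nil {α : Type} (l : List α) :
    l.foldl (fun _ _ => ([] : List String)) [] = [] := by
  induction l with
  | nil => rfl
  | cons x t ih => simpa using ih

-- B written as a flatMap of per-block-row chunks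
theorem alt_flatMap (s : List (List (List String))) :
    join_square_alt s
      = s.flatMap (fun row =>
          (PySem.List.pyRange 0 (s.length:Int) 1).foldl
            (fun acc j => (PySem.List.pyRange 0 ((((s.getD 0 []).getD 0 []).length : Nat):Int) 1).map
              (fun r => PySem.List.pyGetD acc r "" ++
                PySem.List.pyGetD (PySem.List.pyGetD row j []) r ""))
            (List.replicate ((s.getD 0 []).getD 0 []).length "")) := by
  simp only [join_square_alt, PySem.List.len_eq, PySem.List.pyGetD_zero,
    PySem.List.pyRepeat_singleton, Int.toNat_natCast]
  rw [PySem.List.foldl_append_eq_flatMap, List.nil_append]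

theorem replicate_eq_map_range {α : Type} (n : Nat) (a : α) :
    List.replicate n a = (List.range n).map (fun _ => a) := by
  simp [List.map_const']

-- the common inner row piece: indices 0..m-1 of a block-row are its first m blocks
theorem row_slice_eq (row : List (List String)) (m r : Nat) (h : m ≤ row.length) :
    (PySem.List.pyRange 0 (m:Int) 1).map
        (fun j => (PySem.List.pyGetD row j []).getD r "")
      = (row.take m).map (fun b => b.getD r "") := by
  rw [map_pyRange_natCast]
  simp only [PySem.List.pyGetD_natCast]
  calc (List.range m).map (fun k => (row.getD k []).getD r "")
      = ((List.range m).map (fun k => row.getD k [])).map (fun b => b.getD r "") := by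
        rw [List.map_map]; rfl
    _ = (row.take m).map (fun b => b.getD r "") := by rw [map_range_getD_take _ _ _ h]

-- the degenerate grid: an empty first block makes both per-block-row pieces empty
theorem join_zero (s : List (List (List String)))
    (hsz : ((s.getD 0 []).getD 0 []).length = 0) :
    join_square s = join_square_alt s := by
  have hA : join_square s = [] := by
    simp only [join_square, PySem.List.len_eq, PySem.List.pyGetD_zero, hsz, Nat.cast_zero,
      mul_zero]
    rw [PySem.List.pyRange_one_eq_nil (le_refl 0)]
    rfl
  have hB : join_square_alt s = [] := by
    rw [alt_flatMap]
    simp only [hsz, Nat.cast_zero, List.replicate_zero,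
      PySem.List.pyRange_one_eq_nil (le_refl (0:Int)), List.map_nil, fold_const_nil]
    simp
  rw [hA, hB]

theorem join_main (s : List (List (List String)))
    (hall : ∀ row ∈ s, s.length ≤ row.length ∧
      ∀ b ∈ row.take s.length, ((s.getD 0 []).getD 0 []).length ≤ b.length) :
    join_square s = join_square_alt s := by
  have hB : join_square_alt s
      = s.flatMap (fun row => (List.range ((s.getD 0 []).getD 0 []).length).map
          (fun r => PySem.Str.join "" ((row.take s.length).map (fun b => b.getD r "")))) := by
    rw [alt_flatMap]
    apply flatMap_congr_mem
    intro row hrow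
    rw [foldl_pyRange_take_map row s.length _ (hall row hrow).1,
      replicate_eq_map_range, fold_acc _ _ _ (hall row hrow).2]
    apply List.map_congr_left
    intro r _
    exact String.empty_append
  have hA : join_square s
      = (List.range s.length).flatMap (fun q => (List.range ((s.getD 0 []).getD 0 []).length).map
          (fun r => PySem.Str.join "" (((s.getD q []).take s.length).map (fun b => b.getD r "")))) := by
    unfold join_square
    simp only [PySem.List.foldl_append_singleton_eq_map, List.nil_append,
      PySem.List.len_eq, PySem.List.pyGetD_zero]
    rw [map_pyRange_mul]
    apply flatMap_congr_mem
    intro q hq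
    apply List.map_congr_left
    intro r hr
    have hq' : q < s.length := List.mem_range.mp hq
    have hr' : r < ((s.getD 0 []).getD 0 []).length := List.mem_range.mp hr
    have hdiv : (q * ((s.getD 0 []).getD 0 []).length + r) / ((s.getD 0 []).getD 0 []).length = q := by
      rw [Nat.mul_comm q, Nat.mul_add_div (by omega), Nat.div_eq_of_lt hr', Nat.add_zero]
    have hmod : (q * ((s.getD 0 []).getD 0 []).length + r) % ((s.getD 0 []).getD 0 []).length = r := by
      rw [Nat.mul_comm q, Nat.mul_add_mod, Nat.mod_eq_of_lt hr']
    rw [PySem.Int.floordiv_natCast, PySem.Int.mod_natCast, hdiv, hmod]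
    simp only [PySem.List.pyGetD_natCast]
    have hrowmem : s.getD q [] ∈ s := by
      rw [List.getD_eq_getElem s [] hq']
      exact List.getElem_mem hq'
    rw [row_slice_eq _ _ _ (hall _ hrowmem).1]
  rw [hA, hB]
  exact range_flatMap_getD
    (fun row => (List.range ((s.getD 0 []).getD 0 []).length).map
      (fun r => PySem.Str.join "" ((row.take s.length).map (fun b => b.getD r "")))) [] s

-- ===== VERDICT (by name: the statement is the Claim_ definition above) =====
theorem join_square_spec : Claim_equal_join_square := by
  intro s _ hpre
  unfold Spec_join_square
  obtain ⟨_, _, hdisj⟩ := hpre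
  rcases hdisj with hsz | hall
  · exact join_zero s hsz
  · exact join_main s hall
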